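-- pv_equiv track=rewrite | github.com/chowdhuryannoor/Comp-Bio-Project | constructors.py | mapToRank
-- ===== SOURCE A (Python) =====
-- def mapToRank(S):
--     map = dict()
--     for index, char in enumerate(sorted(set(S))):
--         map[char] = index + 1
--
--     ranking = []
--     for char in S:
--         ranking.append(map[char])
--
--     return ranking
-- ===== SOURCE B (Python) =====
-- def mapToRank(S):
--     distinct = set(S)
--     return [sum(1 for d in distinct if d <= c) for c in S]
-- ===== Notes on version B (the rewrite author's own statement) =====
-- stated objective: simpler
-- what changed: Replaces sort + enumerated rank dict + lookup loop with a two-line counting comprehension: each element's rank is the number of distinct elements <= it.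
import Mathlib
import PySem

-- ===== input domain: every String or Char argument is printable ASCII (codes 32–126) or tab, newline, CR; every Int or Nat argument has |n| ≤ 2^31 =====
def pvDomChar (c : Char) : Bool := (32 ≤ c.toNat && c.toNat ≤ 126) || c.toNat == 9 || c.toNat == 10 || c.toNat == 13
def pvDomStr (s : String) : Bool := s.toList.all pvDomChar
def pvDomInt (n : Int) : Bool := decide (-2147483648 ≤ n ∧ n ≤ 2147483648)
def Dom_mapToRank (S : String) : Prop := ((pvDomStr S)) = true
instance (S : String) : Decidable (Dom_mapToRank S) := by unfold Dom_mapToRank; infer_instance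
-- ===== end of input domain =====

-- B replaces the sort + enumerated rank dict + lookup loop with a counting
-- comprehension (rank of c = number of distinct elements ≤ c); objective: simpler.

-- ===== PORT A =====
-- A: build map[char] = index+1 over enumerate(sorted(set(S))), then look up each char of S.
-- map[char] always succeeds (char ∈ set(S)), so the total lookup 'getD c 0' is exact here.
def mapToRank (S : String) : List Int :=
  let m : PySem.Dict Char Int :=
    (PySem.List.enumerate (PySem.List.sorted (PySem.Set.ofList S.toList) (fun x => x) false) 0).foldl
      (fun d p => d.insert p.2 (p.1 + 1)) PySem.Dict.empty
  S.toList.foldl (fun acc c => acc ++ [m.getD c 0]) []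

-- ===== PORT B =====
def mapToRank_alt (S : String) : List Int :=
  let distinct : PySem.Set Char := PySem.Set.ofList S.toList
  S.toList.map (fun c => ((distinct.filter (fun d => decide (d ≤ c))).length : Int))

-- ===== PRECONDITION & SPEC =====
def Spec_mapToRank (S : String) (out : List Int) : Prop := out = mapToRank_alt S
instance (S : String) (out : List Int) : Decidable (Spec_mapToRank S out) := by unfold Spec_mapToRank; infer_instance

-- ===== CLAIM (what is proved, stated in full; the proofs are below) =====
def Claim_equal_mapToRank : Prop := ∀ (S : String), Dom_mapToRank S → Spec_mapToRank S (mapToRank S)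

-- ===== LEMMAS AND PROOFS =====

-- append-accumulator fold is a map
theorem pv_foldl_append_map {α β : Type} (f : α → β) :
    ∀ (l : List α) (acc : List β),
      l.foldl (fun a c => a ++ [f c]) acc = acc ++ l.map f := by
  intro l
  induction l with
  | nil => simp
  | cons x t ih => intro acc; simp [List.foldl, ih]

-- a fold of inserts leaves untouched keys alone
theorem pv_getD_foldl_insert_not_mem (ps : List (Int × Char)) (d0 : PySem.Dict Char Int)
    (c : Char) (h : c ∉ ps.map (·.2)) :
    (ps.foldl (fun d p => d.insert p.2 (p.1 + 1)) d0).getD c 0 = d0.getD c 0 := by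
  induction ps generalizing d0 with
  | nil => rfl
  | cons p t ih =>
      simp only [List.map_cons, List.mem_cons, not_or] at h
      simp only [List.foldl]
      rw [ih _ h.2, PySem.Dict.getD_insert_of_ne _ _ _ h.1]

-- dict built from an enumerated strictly increasing list maps c to s0 + #{d ∈ L | d ≤ c}
theorem pv_getD_rank (L : List Char) (hL : L.Pairwise (· < ·)) (c : Char) (hc : c ∈ L) :
    ∀ (s0 : Int) (d0 : PySem.Dict Char Int),
      ((PySem.List.enumerate L s0).foldl (fun d p => d.insert p.2 (p.1 + 1)) d0).getD c 0
        = s0 + ((L.filter (fun d => decide (d ≤ c))).length : Int) := by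
  induction L with
  | nil => cases hc
  | cons a t ih =>
      intro s0 d0
      rw [PySem.List.enumerate_cons]
      simp only [List.foldl]
      rcases List.pairwise_cons.mp hL with ⟨ha, ht⟩
      rcases List.mem_cons.mp hc with heq | hct
      · subst heq
        have hnot : c ∉ (PySem.List.enumerate t (s0 + 1)).map (·.2) := by
          rw [PySem.List.map_snd_enumerate]
          intro hmem
          exact absurd rfl (ne_of_lt (ha c hmem))
        rw [pv_getD_foldl_insert_not_mem _ _ _ hnot, PySem.Dict.getD_insert_self]
        have hfilter : (c :: t).filter (fun d => decide (d ≤ c)) = [c] := by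
          simp only [List.filter_cons, decide_eq_true_eq]
          rw [if_pos le_rfl, List.filter_eq_nil_iff.mpr]
          intro d hd
          simp only [decide_eq_true_eq, not_le]
          exact ha d hd
        rw [hfilter]
        simp
      · rw [ih ht hct]
        have hac : a ≤ c := le_of_lt (ha c hct)
        simp only [List.filter_cons, decide_eq_true_eq, if_pos hac, List.length_cons]
        push_cast
        ring

theorem mapToRank_eq (S : String) : mapToRank S = mapToRank_alt S := by
  unfold mapToRank mapToRank_alt
  simp only []
  rw [pv_foldl_append_map, List.nil_append]
  apply List.map_congr_left
  intro c hcS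
  set s : PySem.Set Char := PySem.Set.ofList S.toList with hs
  set L := PySem.List.sorted s (fun x => x) false with hLdef
  have hperm : L.Perm s := PySem.List.sorted_perm _ _ _
  have hpair : L.Pairwise (· < ·) := PySem.List.sorted_ofList_pairwise_lt _
  have hcs : c ∈ s := by
    rw [hs]; exact (PySem.Set.mem_ofList _ _).mpr hcS
  have hcL : c ∈ L := hperm.mem_iff.mpr hcs
  rw [pv_getD_rank L hpair c hcL 0 PySem.Dict.empty]
  have : (L.filter (fun d => decide (d ≤ c))).length
       = (s.filter (fun d => decide (d ≤ c))).length :=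
    (hperm.filter _).length_eq
  rw [this]
  ring

-- ===== VERDICT (by name: the statement is the Claim_ definition above) =====
theorem mapToRank_spec : Claim_equal_mapToRank := by
  intro S _
  unfold Spec_mapToRank
  exact mapToRank_eq S
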